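-- pv_equiv track=rewrite | github.com/robert1948/autorisen | backend/src/modules/ai_router/strategy.py | parse_fallback_order
-- ===== SOURCE A (Python) =====
-- from typing import Iterable, Literal
--
-- ProviderName = Literal["bedrock", "anthropic", "openai"]
--
-- _ALL_PROVIDERS: tuple[ProviderName, ...] = ("bedrock", "anthropic", "openai")
--
-- def _normalize_provider_name(name: str) -> ProviderName | None:
--     cleaned = (name or "").strip().lower()
--     if cleaned in _ALL_PROVIDERS:
--         return cleaned
--     return None
--
-- def parse_fallback_order(raw: str | None) -> list[ProviderName]:
--     """Parse and sanitize a comma-separated provider order string."""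
--     if not raw:
--         return list(_ALL_PROVIDERS)
--
--     ordered: list[ProviderName] = []
--     for token in raw.split(","):
--         provider = _normalize_provider_name(token)
--         if provider and provider not in ordered:
--             ordered.append(provider)
--
--     if not ordered:
--         return list(_ALL_PROVIDERS)
--
--     for provider in _ALL_PROVIDERS:
--         if provider not in ordered:
--             ordered.append(provider)
--
--     return ordered
-- ===== SOURCE B (Python) =====
-- from typing import Literal
--
-- ProviderName = Literal["bedrock", "anthropic", "openai"]
--
-- _ALL_PROVIDERS: tuple[ProviderName, ...] = ("bedrock", "anthropic", "openai")
--
-- def parse_fallback_order(raw):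
--     """Index valid providers by first-appearance rank, then stable-sort the canonical tuple by that rank."""
--     if not raw:
--         return list(_ALL_PROVIDERS)
--     pos = {}
--     for token in raw.split(","):
--         t = token.strip().lower()
--         if t in _ALL_PROVIDERS:
--             pos.setdefault(t, len(pos))
--     return sorted(_ALL_PROVIDERS, key=lambda p: pos.get(p, len(_ALL_PROVIDERS)))
-- ===== Notes on version B (the rewrite author's own statement) =====
-- stated objective: idiomatic
-- what changed: Instead of building the ordered list with membership checks and then a second fill-in loop (plus a special empty-result branch), B records each valid provider's first-appearance rank in a dict in one pass and returns a stable sort of the canonical provider tuple by that rank, which subsumes both the fill-in loop and the all-invalid fallback.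
import Mathlib
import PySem

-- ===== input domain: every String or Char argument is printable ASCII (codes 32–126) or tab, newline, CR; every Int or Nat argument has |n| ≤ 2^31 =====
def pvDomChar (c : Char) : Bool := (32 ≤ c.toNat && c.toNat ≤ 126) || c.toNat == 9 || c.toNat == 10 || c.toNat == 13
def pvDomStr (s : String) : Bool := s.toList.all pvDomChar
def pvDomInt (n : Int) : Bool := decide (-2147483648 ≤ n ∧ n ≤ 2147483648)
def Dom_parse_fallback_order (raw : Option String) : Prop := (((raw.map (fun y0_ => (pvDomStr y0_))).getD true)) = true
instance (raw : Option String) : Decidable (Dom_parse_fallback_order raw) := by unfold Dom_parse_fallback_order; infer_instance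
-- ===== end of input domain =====

-- B replaces A's dedup-list loop + fill-in loop + empty-result branch by a first-appearance-rank
-- dict and one stable sort of the canonical tuple by rank (objective: idiomatic; same cost).

-- ===== PORT A =====
-- _ALL_PROVIDERS
def pvAllProviders : List String := ["bedrock", "anthropic", "openai"]

-- _normalize_provider_name
def pvNormalize (name : String) : Option String :=
  let cleaned := PySem.Str.lower (PySem.Str.strip (if name = "" then "" else name))
  if pvAllProviders.contains cleaned then some cleaned else none

-- body of A's first loop ('for token in raw.split(",")')
def pvAStep (ordered : List String) (token : String) : List String :=
  match pvNormalize token with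
  | some provider =>
      if provider ≠ "" ∧ ¬ ordered.contains provider then ordered ++ [provider] else ordered
  | none => ordered

-- A's second loop ('for provider in _ALL_PROVIDERS: …')
def pvAFill (ordered : List String) : List String :=
  pvAllProviders.foldl (fun o p => if o.contains p then o else o ++ [p]) ordered

def parse_fallback_order (raw : Option String) : List String :=
  match raw with
  | none => pvAllProviders
  | some r =>
    if r = "" then pvAllProviders
    else
      let ordered := ((PySem.Str.split? r ",").getD []).foldl pvAStep []
      if ordered = [] then pvAllProviders else pvAFill ordered

-- ===== PORT B =====
-- body of B's loop: rank each valid provider by first appearance (setdefault keeps the first rank)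
def pvBStep (pos : PySem.Dict String Nat) (token : String) : PySem.Dict String Nat :=
  let t := PySem.Str.lower (PySem.Str.strip token)
  if pvAllProviders.contains t then pos.setdefault t pos.size else pos

def parse_fallback_order_alt (raw : Option String) : List String :=
  match raw with
  | none => pvAllProviders
  | some r =>
    if r = "" then pvAllProviders
    else
      let pos := ((PySem.Str.split? r ",").getD []).foldl pvBStep PySem.Dict.empty
      PySem.List.sorted pvAllProviders (fun p => pos.getD p pvAllProviders.length) false

-- ===== PRECONDITION & SPEC =====
def Spec_parse_fallback_order (raw : Option String) (out : List String) : Prop := out = parse_fallback_order_alt raw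
instance (raw : Option String) (out : List String) : Decidable (Spec_parse_fallback_order raw out) := by unfold Spec_parse_fallback_order; infer_instance

-- ===== CLAIM (what is proved, stated in full; the proofs are below) =====
def Claim_equal_parse_fallback_order : Prop := ∀ (raw : Option String), Dom_parse_fallback_order raw → Spec_parse_fallback_order raw (parse_fallback_order raw)

-- ===== LEMMAS AND PROOFS =====

-- B's dict after processing the same tokens as A is exactly 'A's ordered list, ranked'
def pvDictOf (L : List String) : PySem.Dict String Nat := ⟨L.zipIdx⟩

-- A's loop state: distinct providers drawn from the canonical three
def pvValid (L : List String) : Prop := L.Nodup ∧ ∀ x ∈ L, x ∈ pvAllProviders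

lemma pvAny_zipIdx (L : List String) (c : String) : ∀ k : Nat,
    ((L.zipIdx k).any fun p => p.1 == c) = L.contains c := by
  induction L with
  | nil => intro k; rfl
  | cons a t ih =>
    intro k
    simp only [List.zipIdx_cons, List.any_cons, ih (k + 1), List.contains_cons]
    rcases eq_or_ne a c with rfl | h
    · rfl
    · rw [beq_eq_false_iff_ne.mpr h, beq_eq_false_iff_ne.mpr (Ne.symm h)]

lemma pvDictOf_contains (L : List String) (c : String) :
    (pvDictOf L).contains c = L.contains c := by
  simpa [pvDictOf, PySem.Dict.contains] using pvAny_zipIdx L c 0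

lemma pvSetdefault_mem (L : List String) (c : String) (h : c ∈ L) :
    (pvDictOf L).setdefault c (pvDictOf L).size = pvDictOf L := by
  simp [PySem.Dict.setdefault, pvDictOf_contains, List.contains_eq_mem, h]

lemma pvSetdefault_append (L : List String) (c : String) (h : c ∉ L) :
    (pvDictOf L).setdefault c (pvDictOf L).size = pvDictOf (L ++ [c]) := by
  simp only [PySem.Dict.setdefault, pvDictOf, PySem.Dict.size, List.length_zipIdx]
  simp [List.zipIdx_append]
  intro x hx
  exact h (by simpa using List.mem_map_of_mem (f := Prod.fst) hx)

lemma pvAStep_eq (L : List String) (tok : String) :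
    pvAStep L tok =
      (if PySem.Str.lower (PySem.Str.strip tok) ∈ pvAllProviders then
        (if PySem.Str.lower (PySem.Str.strip tok) ∈ L then L
         else L ++ [PySem.Str.lower (PySem.Str.strip tok)]) else L) := by
  have h1 : (if tok = "" then "" else tok) = tok := by
    by_cases h : tok = "" <;> simp [h]
  unfold pvAStep pvNormalize
  rw [h1]
  generalize PySem.Str.lower (PySem.Str.strip tok) = c
  by_cases hc : c ∈ pvAllProviders
  · have hne : c ≠ "" := by
      rcases (by simpa [pvAllProviders] using hc : c = "bedrock" ∨ c = "anthropic" ∨ c = "openai")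
        with h | h | h <;> simp [h]
    by_cases hm : c ∈ L <;> simp [List.contains_eq_mem, hc, hne, hm]
  · simp [List.contains_eq_mem, hc]

lemma pvStep_sync (L : List String) (tok : String) (hv : pvValid L) :
    pvBStep (pvDictOf L) tok = pvDictOf (pvAStep L tok) ∧ pvValid (pvAStep L tok) := by
  rw [pvAStep_eq]
  simp only [pvBStep]
  generalize PySem.Str.lower (PySem.Str.strip tok) = c
  by_cases h1 : c ∈ pvAllProviders
  · by_cases h2 : c ∈ L
    · simp only [List.contains_eq_mem, h1, h2, decide_true, if_pos]
      exact ⟨pvSetdefault_mem L c h2, hv⟩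
    · simp only [List.contains_eq_mem, h1, h2, decide_true, if_true, if_false]
      refine ⟨pvSetdefault_append L c h2, ?_, ?_⟩
      · simpa [List.nodup_append] using ⟨hv.1, fun a ha hac => h2 (hac ▸ ha)⟩
      · intro x hx
        rcases List.mem_append.1 hx with hx | hx
        · exact hv.2 x hx
        · simp only [List.mem_singleton] at hx
          exact hx ▸ h1
  · simp only [List.contains_eq_mem, h1, decide_false, Bool.false_eq_true, if_false]
    exact ⟨trivial, hv⟩

lemma pvLoop_sync (ts : List String) : ∀ (L : List String), pvValid L →
    ts.foldl pvBStep (pvDictOf L) = pvDictOf (ts.foldl pvAStep L) ∧ pvValid (ts.foldl pvAStep L) := by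
  induction ts with
  | nil => exact fun L hv => ⟨rfl, hv⟩
  | cons t ts ih =>
    intro L hv
    obtain ⟨heq, hv'⟩ := pvStep_sync L t hv
    simpa [List.foldl_cons, heq] using ih (pvAStep L t) hv'

-- every distinct sublist-of-three that A's loop can produce
def pvAllOrders : List (List String) :=
  [[], ["bedrock"], ["anthropic"], ["openai"],
   ["bedrock", "anthropic"], ["bedrock", "openai"],
   ["anthropic", "bedrock"], ["anthropic", "openai"],
   ["openai", "bedrock"], ["openai", "anthropic"],
   ["bedrock", "anthropic", "openai"], ["bedrock", "openai", "anthropic"],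
   ["anthropic", "bedrock", "openai"], ["anthropic", "openai", "bedrock"],
   ["openai", "bedrock", "anthropic"], ["openai", "anthropic", "bedrock"]]

lemma pvValid_enum (L : List String) (hv : pvValid L) : L ∈ pvAllOrders := by
  obtain ⟨hnd, hsub⟩ := hv
  match L with
  | [] => decide
  | [a] =>
    have ha := hsub a (by simp)
    simp only [pvAllProviders, List.mem_cons, List.not_mem_nil, or_false] at ha
    rcases ha with rfl | rfl | rfl <;> decide
  | [a, b] =>
    have ha := hsub a (by simp)
    have hb := hsub b (by simp)
    simp only [pvAllProviders, List.mem_cons, List.not_mem_nil, or_false] at ha hb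
    rcases ha with rfl | rfl | rfl <;> rcases hb with rfl | rfl | rfl <;>
      first | (exact absurd hnd (by decide)) | decide
  | [a, b, c] =>
    have ha := hsub a (by simp)
    have hb := hsub b (by simp)
    have hc := hsub c (by simp)
    simp only [pvAllProviders, List.mem_cons, List.not_mem_nil, or_false] at ha hb hc
    rcases ha with rfl | rfl | rfl <;> rcases hb with rfl | rfl | rfl <;>
      rcases hc with rfl | rfl | rfl <;>
      first | (exact absurd hnd (by decide)) | decide
  | a :: b :: c :: d :: t =>
    have ha := hsub a (by simp)
    have hb := hsub b (by simp)
    have hc := hsub c (by simp)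
    have hd := hsub d (by simp)
    simp only [pvAllProviders, List.mem_cons, List.not_mem_nil, or_false] at ha hb hc hd
    simp only [List.nodup_cons, List.mem_cons] at hnd
    rcases ha with rfl | rfl | rfl <;> rcases hb with rfl | rfl | rfl <;>
      rcases hc with rfl | rfl | rfl <;> rcases hd with rfl | rfl | rfl <;> simp_all

-- the stable sort by rank reproduces A's 'ordered ++ missing-in-canonical-order' (and the empty fallback)
lemma pvFinal (L : List String) (hv : pvValid L) :
    PySem.List.sorted pvAllProviders (fun p => (pvDictOf L).getD p pvAllProviders.length) false =
      (if L = [] then pvAllProviders else pvAFill L) := by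
  have hm := pvValid_enum L hv
  simp only [pvAllOrders, List.mem_cons, List.not_mem_nil, or_false] at hm
  rcases hm with rfl | rfl | rfl | rfl | rfl | rfl | rfl | rfl | rfl | rfl | rfl | rfl | rfl | rfl | rfl | rfl <;> decide

-- ===== VERDICT (by name: the statement is the Claim_ definition above) =====
theorem parse_fallback_order_spec : Claim_equal_parse_fallback_order := by
  intro raw _
  unfold Spec_parse_fallback_order parse_fallback_order parse_fallback_order_alt
  match raw with
  | none => rfl
  | some r =>
    by_cases hr : r = ""
    · simp [hr]
    · simp only [hr]
      obtain ⟨heq, hv⟩ := pvLoop_sync ((PySem.Str.split? r ",").getD []) [] ⟨List.nodup_nil, by simp⟩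
      have : pvDictOf [] = PySem.Dict.empty := rfl
      rw [← this, heq, pvFinal _ hv]
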